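-- pv_equiv track=rewrite | github.com/alierenaltindag/pathologic | pathologic/explain/visualizer.py | _resolve_hotspot_columns
-- ===== SOURCE A (Python) =====
-- def _resolve_hotspot_columns(rows: list[dict[str, float | int | str]]) -> list[str]:
--     if not rows:
--         return []
--
--     priority = [
--         "group_column",
--         "gene_id",
--         "Protein change",
--         "false_positive_count",
--         "negative_count",
--         "false_positive_rate",
--         "overall_false_positive_rate",
--         "false_positive_risk_ratio",
--     ]
--     all_keys: set[str] = set()
--     for item in rows:
--         all_keys.update(str(key) for key in item.keys())
--
--     ordered = [key for key in priority if key in all_keys]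
--     remaining = sorted(key for key in all_keys if key not in set(ordered))
--     return ordered + remaining
-- ===== SOURCE B (Python) =====
-- def _resolve_hotspot_columns(rows: list[dict[str, float | int | str]]) -> list[str]:
--     priority = [
--         "group_column",
--         "gene_id",
--         "Protein change",
--         "false_positive_count",
--         "negative_count",
--         "false_positive_rate",
--         "overall_false_positive_rate",
--         "false_positive_risk_ratio",
--     ]
--     rank = {name: i for i, name in enumerate(priority)}
--     n = len(priority)
--     seen = {str(key) for item in rows for key in item.keys()}
--     return sorted(seen, key=lambda k: (rank.get(k, n), "" if k in rank else k))
-- ===== Notes on version B (the rewrite author's own statement) =====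
-- stated objective: idiomatic
-- what changed: Replaces A's partition into a priority-filtered list plus a separately sorted remainder (with two membership sets) by one sorted() call over the aggregated key set using a composite (rank, name) key built from an enumerate-based rank dict.
import Mathlib
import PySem

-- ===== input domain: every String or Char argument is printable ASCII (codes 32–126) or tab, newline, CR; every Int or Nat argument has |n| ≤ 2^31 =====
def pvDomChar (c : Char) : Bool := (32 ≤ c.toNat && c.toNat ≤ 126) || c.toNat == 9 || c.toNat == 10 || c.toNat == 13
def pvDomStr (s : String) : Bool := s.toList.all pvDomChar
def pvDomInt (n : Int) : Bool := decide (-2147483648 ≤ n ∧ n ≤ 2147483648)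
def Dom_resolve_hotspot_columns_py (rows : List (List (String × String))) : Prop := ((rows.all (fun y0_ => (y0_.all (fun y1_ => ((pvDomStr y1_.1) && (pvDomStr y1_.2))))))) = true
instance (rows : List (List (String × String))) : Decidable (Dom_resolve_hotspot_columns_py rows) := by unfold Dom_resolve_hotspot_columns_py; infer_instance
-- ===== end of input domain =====

-- B replaces A's partition-then-sort (priority filter + sorted remainder) by a single
-- sort of the aggregated key set under a composite (rank, name) key; objective: idiomatic.

-- shared data constant: the priority list literal both Pythons contain
def pvPriority : List String :=
  ["group_column", "gene_id", "Protein change", "false_positive_count",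
   "negative_count", "false_positive_rate", "overall_false_positive_rate",
   "false_positive_risk_ratio"]

-- ===== PORT A =====
def resolve_hotspot_columns_py (rows : List (List (String × String))) : List String :=
  if rows = [] then []
  else
    let priority := pvPriority
    let all_keys : PySem.Set String :=
      rows.foldl (fun s item => PySem.Set.update s (item.map (fun kv => kv.1))) PySem.Set.empty
    let ordered := priority.filter (fun k => PySem.Set.contains all_keys k)
    let remaining := PySem.List.sorted
      (all_keys.filter (fun k => !(PySem.Set.ofList ordered).contains k)) (fun k => k) false
    ordered ++ remaining

-- ===== PORT B =====
-- B-side helper: the rank dict {name: i for i, name in enumerate(priority)}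
def pvRankB : PySem.Dict String Int :=
  (PySem.List.enumerate pvPriority 0).foldl (fun d p => d.insert p.2 p.1) (PySem.Dict.empty : PySem.Dict String Int)

def resolve_hotspot_columns_py_alt (rows : List (List (String × String))) : List String :=
  let priority := pvPriority
  let rank := pvRankB
  let n : Int := (priority.length : Int)
  let seen : PySem.Set String :=
    PySem.Set.ofList (rows.flatMap (fun item => item.map (fun kv => kv.1)))
  PySem.List.sorted seen
    (fun k => toLex (((rank.get? k).getD n, if rank.contains k then "" else k) : Int × String)) false

-- ===== PRECONDITION & SPEC =====
def Spec_resolve_hotspot_columns_py (rows : List (List (String × String))) (out : List String) : Prop := out = resolve_hotspot_columns_py_alt rows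
instance (rows : List (List (String × String))) (out : List String) : Decidable (Spec_resolve_hotspot_columns_py rows out) := by unfold Spec_resolve_hotspot_columns_py; infer_instance

-- ===== CLAIM (what is proved, stated in full; the proofs are below) =====
def Claim_equal_resolve_hotspot_columns_py : Prop := ∀ (rows : List (List (String × String))), Dom_resolve_hotspot_columns_py rows → Spec_resolve_hotspot_columns_py rows (resolve_hotspot_columns_py rows)

-- ===== LEMMAS AND PROOFS =====

-- the composite key B sorts by
def pvKeyB (k : String) : Lex (Int × String) :=
  toLex (((pvRankB.get? k).getD (pvPriority.length : Int), if pvRankB.contains k then "" else k) : Int × String)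

theorem pvRankB_keys : pvRankB.keys = pvPriority := by decide

theorem pvRankB_contains_iff (k : String) : pvRankB.contains k = true ↔ k ∈ pvPriority := by
  rw [PySem.Dict.contains_eq_decide_mem_keys, pvRankB_keys]; simp

theorem pvKeyB_of_not_mem {k : String} (h : k ∉ pvPriority) :
    pvKeyB k = toLex (((pvPriority.length : Int), k) : Int × String) := by
  have hc : pvRankB.contains k = false := by
    cases h' : pvRankB.contains k
    · rfl
    · exact absurd ((pvRankB_contains_iff k).mp h') h
  have hg : pvRankB.get? k = none := by
    rw [PySem.Dict.get?_eq_none_iff_not_mem_keys, pvRankB_keys]; exact h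
  simp [pvKeyB, hg, hc]

theorem pvKeyB_lt_of_mem_priority {a : String} (ha : a ∈ pvPriority) (b : String)
    (hb : b ∉ pvPriority) : pvKeyB a < pvKeyB b := by
  rw [pvKeyB_of_not_mem hb]
  have hlt : ((pvRankB.get? a).getD (pvPriority.length : Int)) < (pvPriority.length : Int) := by
    fin_cases ha <;> decide
  unfold pvKeyB
  rw [Prod.Lex.toLex_lt_toLex]
  exact Or.inl hlt

theorem pvPriority_pairwise : pvPriority.Pairwise (fun a b => pvKeyB a < pvKeyB b) := by
  unfold pvKeyB; decide

theorem pvPriority_nodup : pvPriority.Nodup := by decide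

-- the aggregation loop of A equals B's flat set
theorem pv_allkeys_eq (rows : List (List (String × String))) (s : PySem.Set String) :
    rows.foldl (fun s item => PySem.Set.update s (item.map (fun kv => kv.1))) s
      = PySem.Set.update s (rows.flatMap (fun item => item.map (fun kv => kv.1))) := by
  induction rows generalizing s with
  | nil => simp [PySem.Set.update]
  | cons r t ih =>
    simp only [List.foldl_cons, List.flatMap_cons, ih]
    simp [PySem.Set.update, List.foldl_append]

theorem pv_main (rows : List (List (String × String))) :
    resolve_hotspot_columns_py rows = resolve_hotspot_columns_py_alt rows := by
  by_cases hrows : rows = []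
  · subst hrows; rfl
  · unfold resolve_hotspot_columns_py resolve_hotspot_columns_py_alt
    rw [if_neg hrows]
    simp only []
    set KS := rows.flatMap (fun item => item.map (fun kv => kv.1)) with hKS
    have hagg : rows.foldl (fun s item => PySem.Set.update s (item.map (fun kv => kv.1)))
        PySem.Set.empty = PySem.Set.ofList KS := by
      rw [pv_allkeys_eq]
      exact PySem.Set.update_nil_left KS
    rw [hagg]
    set seen := PySem.Set.ofList KS with hseen
    set ordered := pvPriority.filter (fun k => PySem.Set.contains seen k) with hord
    set RF := seen.filter (fun k => !(PySem.Set.ofList ordered).contains k) with hRF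
    set remaining := PySem.List.sorted RF (fun k => k) false with hrem
    have hseenN : seen.Nodup := PySem.Set.nodup_ofList KS
    have hmem_ord : ∀ x, x ∈ ordered ↔ x ∈ pvPriority ∧ x ∈ seen := by
      intro x
      simp [hord, List.mem_filter]
    have hmem_RF : ∀ x, x ∈ RF ↔ x ∈ seen ∧ x ∉ ordered := by
      intro x
      simp [hRF, List.mem_filter, PySem.Set.mem_ofList]
    have hmem_rem : ∀ x, x ∈ remaining ↔ x ∈ RF := fun x => PySem.List.mem_sorted RF _ false x
    have hnotP_of_rem : ∀ x ∈ remaining, x ∈ seen ∧ x ∉ pvPriority := by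
      intro x hx
      rcases (hmem_RF x).mp ((hmem_rem x).mp hx) with ⟨hs, hno⟩
      refine ⟨hs, fun hp => hno ((hmem_ord x).mpr ⟨hp, hs⟩)⟩
    have hordN : ordered.Nodup := List.Nodup.filter _ pvPriority_nodup
    have hRFN : RF.Nodup := List.Nodup.filter _ hseenN
    have hremN : remaining.Nodup := (PySem.List.sorted_perm RF _ false).nodup_iff.mpr hRFN
    -- the combined list is a permutation of seen
    have hperm : (ordered ++ remaining).Perm seen := by
      rw [List.perm_ext_iff_of_nodup ?_ hseenN]
      · intro a
        constructor
        · intro h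
          rcases List.mem_append.mp h with h | h
          · exact ((hmem_ord a).mp h).2
          · exact (hnotP_of_rem a h).1
        · intro h
          by_cases ho : a ∈ ordered
          · exact List.mem_append.mpr (Or.inl ho)
          · exact List.mem_append.mpr (Or.inr ((hmem_rem a).mpr ((hmem_RF a).mpr ⟨h, ho⟩)))
      · rw [List.nodup_append]
        refine ⟨hordN, hremN, ?_⟩
        intro a ha b hb heq
        exact ((hmem_RF b).mp ((hmem_rem b).mp hb)).2 (heq ▸ ha)
    -- the combined list is strictly increasing under B's key
    have hpair : (ordered ++ remaining).Pairwise (fun a b => pvKeyB a < pvKeyB b) := by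
      rw [List.pairwise_append]
      refine ⟨List.Pairwise.filter _ pvPriority_pairwise, ?_, ?_⟩
      · -- remaining: strictly increasing strings outside the priority list
        have hle : remaining.Pairwise (fun a b => a ≤ b) := by
          simpa using PySem.List.sorted_pairwise RF (fun k => k)
        have hne : remaining.Pairwise (fun a b => a ≠ b) := hremN
        have hlt : remaining.Pairwise (fun a b => a < b) :=
          (hle.and hne).imp (fun h => lt_of_le_of_ne h.1 h.2)
        refine List.Pairwise.imp_of_mem (fun {a b} ha hb hab => ?_) hlt
        rw [pvKeyB_of_not_mem (hnotP_of_rem a ha).2, pvKeyB_of_not_mem (hnotP_of_rem b hb).2,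
          Prod.Lex.toLex_lt_toLex]
        exact Or.inr ⟨rfl, hab⟩
      · intro a ha b hb
        exact pvKeyB_lt_of_mem_priority ((hmem_ord a).mp ha).1 b (hnotP_of_rem b hb).2
    exact (PySem.List.sorted_eq_of_perm_of_pairwise_lt seen (ordered ++ remaining) pvKeyB
      hperm hpair).symm

-- ===== VERDICT (by name: the statement is the Claim_ definition above) =====
theorem resolve_hotspot_columns_py_spec : Claim_equal_resolve_hotspot_columns_py := by
  intro rows _
  unfold Spec_resolve_hotspot_columns_py
  exact pv_main rows
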